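-- pv_equiv track=rewrite | github.com/masaya722/msya3 | ProgramingContest/code_festival/2014/n.py | f
-- ===== SOURCE A (Python) =====
-- def f(i):
--     ans = 0
--     base = i
--     digit =1
--     while i//10>0:
--         i//=10
--         ans+=(base**digit)*(i%10)
--         digit+=1
--     return ans+(base%10)
-- ===== SOURCE B (Python) =====
-- def f(i):
--     base = i
--     digits = [i % 10]
--     while i // 10 > 0:
--         i //= 10
--         digits.append(i % 10)
--     result = 0
--     for d in reversed(digits):
--         result = result * base + d
--     return result
-- ===== Notes on version B (the rewrite author's own statement) =====
-- stated objective: alternative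
-- what changed: B first collects the digits into a list and then evaluates the digit polynomial at base=i with Horner's rule (result = result*base + d), eliminating every base**digit exponentiation of A.
import Mathlib
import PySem

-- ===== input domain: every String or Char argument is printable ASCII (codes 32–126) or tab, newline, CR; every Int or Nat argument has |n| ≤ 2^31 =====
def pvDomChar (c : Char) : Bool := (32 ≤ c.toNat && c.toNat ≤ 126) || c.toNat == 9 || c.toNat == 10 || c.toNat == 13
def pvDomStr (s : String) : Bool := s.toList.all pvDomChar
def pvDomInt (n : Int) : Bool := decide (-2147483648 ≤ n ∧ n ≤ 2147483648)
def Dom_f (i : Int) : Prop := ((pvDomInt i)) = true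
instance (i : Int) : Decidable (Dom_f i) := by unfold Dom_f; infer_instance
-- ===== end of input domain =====

-- B replaces A's per-digit base**digit power sum by a digit list evaluated with Horner's rule (alternative decomposition).

-- ===== PORT A =====
-- A's while loop: state (i, ans, digit); base is fixed.
def fLoopA (i ans base : Int) (digit : Nat) : Int :=
  if PySem.Int.floordiv i 10 > 0 then
    fLoopA (PySem.Int.floordiv i 10)
      (ans + base ^ digit * PySem.Int.mod (PySem.Int.floordiv i 10) 10) base (digit + 1)
  else ans
termination_by i.toNat
decreasing_by
  rw [PySem.Int.floordiv_eq_ediv_of_pos (by norm_num)] at *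
  omega

def f (i : Int) : Int := fLoopA i 0 i 1 + PySem.Int.mod i 10

-- ===== PORT B =====
-- B's while loop: collect the digits appended after the initial i % 10.
def digitsLoopB (i : Int) : List Int :=
  if PySem.Int.floordiv i 10 > 0 then
    PySem.Int.mod (PySem.Int.floordiv i 10) 10 :: digitsLoopB (PySem.Int.floordiv i 10)
  else []
termination_by i.toNat
decreasing_by
  rw [PySem.Int.floordiv_eq_ediv_of_pos (by norm_num)] at *
  omega

def f_alt (i : Int) : Int :=
  let base := i
  let digits := PySem.Int.mod i 10 :: digitsLoopB i
  digits.reverse.foldl (fun result d => result * base + d) 0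

-- ===== PRECONDITION & SPEC =====
def Spec_f (i : Int) (out : Int) : Prop := out = f_alt i
instance (i : Int) (out : Int) : Decidable (Spec_f i out) := by unfold Spec_f; infer_instance

-- ===== CLAIM (what is proved, stated in full; the proofs are below) =====
def Claim_equal_f : Prop := ∀ (i : Int), Dom_f i → Spec_f i (f i)

-- ===== LEMMAS AND PROOFS =====

-- Value of the digit polynomial Σ base^k · ds[k].
def polyEval (ds : List Int) (base : Int) : Int :=
  ds.foldr (fun d acc => d + base * acc) 0

theorem fLoopA_eq_poly (i ans base : Int) (digit : Nat) :
    fLoopA i ans base digit = ans + base ^ digit * polyEval (digitsLoopB i) base := by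
  fun_induction fLoopA i ans base digit with
  | case1 i' a dg h ih =>
      rw [ih]
      conv_rhs => rw [digitsLoopB]
      rw [if_pos h]
      simp [polyEval, pow_succ]
      ring
  | case2 i' a dg h =>
      rw [digitsLoopB, if_neg h]
      simp [polyEval]

theorem horner_reverse (ds : List Int) (acc base : Int) :
    ds.reverse.foldl (fun result d => result * base + d) acc
      = acc * base ^ ds.length + polyEval ds base := by
  induction ds generalizing acc with
  | nil => simp [polyEval]
  | cons d ds ih =>
      simp only [List.reverse_cons, List.foldl_append, List.foldl_cons, List.foldl_nil, ih,
        polyEval, List.foldr_cons, List.length_cons, pow_succ]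
      ring

theorem f_eq_f_alt (i : Int) : f i = f_alt i := by
  simp only [f, f_alt, fLoopA_eq_poly, horner_reverse, polyEval, List.foldr_cons, pow_one]
  ring

-- ===== VERDICT (by name: the statement is the Claim_ definition above) =====
theorem f_spec : Claim_equal_f := by
  intro i _
  unfold Spec_f
  exact f_eq_f_alt i
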